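-- pv_equiv track=rewrite | github.com/ZeyuPing/SYSU_AI_LAB | Lab3_Codes/utils/parse.py | split_literals
-- ===== SOURCE A (Python) =====
-- def split_literals(clause_str):
--     """
--     拆分字面量，确保谓词内部的逗号不被拆分
--     """
--     literals = []
--     current = ""
--     paren_count = 0
--     for char in clause_str:
--         if char == '(':
--             paren_count += 1
--             current += char
--         elif char == ')':
--             paren_count -= 1
--             current += char
--         elif char == ',' and paren_count == 0:
--             if current.strip():
--                 literals.append(current.strip())
--             current = ""
--         else:
--             current += char
--     if current.strip():
--         literals.append(current.strip())
--     return literals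
-- ===== SOURCE B (Python) =====
-- def split_literals(clause_str):
--     # Pass 1: find the indices of top-level commas (paren depth 0).
--     boundaries = []
--     depth = 0
--     for i, ch in enumerate(clause_str):
--         if ch == '(':
--             depth += 1
--         elif ch == ')':
--             depth -= 1
--         elif ch == ',' and depth == 0:
--             boundaries.append(i)
--     # Pass 2: slice the string between consecutive boundaries, strip, drop empties.
--     result = []
--     prev = 0
--     for b in boundaries + [len(clause_str)]:
--         seg = clause_str[prev:b].strip()
--         if seg:
--             result.append(seg)
--         prev = b + 1
--     return result
-- ===== Notes on version B (the rewrite author's own statement) =====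
-- stated objective: alternative
-- what changed: Replaces A's single pass that accumulates the current literal character by character with a two-pass scheme: first collect the indices of top-level commas, then slice the original string between consecutive boundaries, stripping and dropping empty segments.
import Mathlib
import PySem

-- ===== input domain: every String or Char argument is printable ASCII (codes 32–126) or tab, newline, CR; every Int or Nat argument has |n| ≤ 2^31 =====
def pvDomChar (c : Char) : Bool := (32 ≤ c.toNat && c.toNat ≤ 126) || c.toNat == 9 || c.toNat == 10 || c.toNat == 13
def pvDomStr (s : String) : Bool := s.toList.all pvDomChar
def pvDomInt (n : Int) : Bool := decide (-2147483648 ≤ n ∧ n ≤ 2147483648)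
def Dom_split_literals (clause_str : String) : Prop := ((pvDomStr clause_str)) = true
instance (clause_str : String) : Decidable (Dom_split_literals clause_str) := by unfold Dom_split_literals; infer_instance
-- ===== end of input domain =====

-- B splits by first recording top-level comma indices, then slicing the original string;
-- A accumulates each literal character by character in one pass. Return values proved equal.

-- ===== PORT A =====
def splitAGo : List Char → List Char → Int → List (List Char) → List (List Char)
  | [], current, _, lits =>
      if PySem.Chars.strip current ≠ [] then lits ++ [PySem.Chars.strip current] else lits
  | c :: rest, current, d, lits =>
      if c = '(' then splitAGo rest (current ++ [c]) (d + 1) lits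
      else if c = ')' then splitAGo rest (current ++ [c]) (d - 1) lits
      else if c = ',' ∧ d = 0 then
        splitAGo rest [] d
          (if PySem.Chars.strip current ≠ [] then lits ++ [PySem.Chars.strip current] else lits)
      else splitAGo rest (current ++ [c]) d lits

def split_literals (clause_str : String) : List String :=
  (splitAGo clause_str.toList [] 0 []).map String.ofList

-- ===== PORT B =====
def boundariesGo : List Char → Nat → Int → List Nat
  | [], _, _ => []
  | c :: rest, i, d =>
      if c = '(' then boundariesGo rest (i + 1) (d + 1)
      else if c = ')' then boundariesGo rest (i + 1) (d - 1)
      else if c = ',' ∧ d = 0 then i :: boundariesGo rest (i + 1) d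
      else boundariesGo rest (i + 1) d

def segsGo (s : List Char) : List Nat → Nat → List (List Char)
  | [], _ => []
  | b :: rest, prev =>
      let seg := PySem.Chars.strip (PySem.List.slice s (some (prev : Int)) (some (b : Int)))
      (if seg ≠ [] then [seg] else []) ++ segsGo s rest (b + 1)

def split_literals_alt (clause_str : String) : List String :=
  (segsGo clause_str.toList
    (boundariesGo clause_str.toList 0 0 ++ [clause_str.toList.length]) 0).map String.ofList

-- ===== PRECONDITION & SPEC =====
def Spec_split_literals (clause_str : String) (out : List String) : Prop := out = split_literals_alt clause_str
instance (clause_str : String) (out : List String) : Decidable (Spec_split_literals clause_str out) := by unfold Spec_split_literals; infer_instance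

-- ===== CLAIM (what is proved, stated in full; the proofs are below) =====
def Claim_equal_split_literals : Prop := ∀ (clause_str : String), Dom_split_literals clause_str → Spec_split_literals clause_str (split_literals clause_str)

-- ===== LEMMAS AND PROOFS =====

/-- The raw (unstripped) top-level segments of a character list at starting depth `d`. -/
def segs : List Char → Int → List (List Char)
  | [], _ => [[]]
  | c :: rest, d =>
      if c = '(' then consHead c (segs rest (d + 1))
      else if c = ')' then consHead c (segs rest (d - 1))
      else if c = ',' ∧ d = 0 then [] :: segs rest d
      else consHead c (segs rest d)
where
  consHead (c : Char) : List (List Char) → List (List Char)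
    | [] => [[c]]
    | h :: t => (c :: h) :: t

/-- Strip each segment and keep the nonempty ones. -/
def post (l : List (List Char)) : List (List Char) :=
  (l.map PySem.Chars.strip).filter (fun x => x ≠ [])

def mapHead (f : List Char → List Char) : List (List Char) → List (List Char)
  | [] => []
  | h :: t => f h :: t

theorem consHead_ne_nil (c : Char) (l : List (List Char)) : segs.consHead c l ≠ [] := by
  cases l <;> simp [segs.consHead]

theorem segs_ne_nil (cs : List Char) (d : Int) : segs cs d ≠ [] := by
  cases cs with
  | nil => simp [segs]
  | cons c rest =>
      simp only [segs]
      split_ifs <;> simp [consHead_ne_nil]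

theorem consHead_cases (c : Char) (l : List (List Char)) (h : l ≠ []) :
    ∃ hd tl, l = hd :: tl ∧ segs.consHead c l = (c :: hd) :: tl := by
  cases l with
  | nil => exact absurd rfl h
  | cons hd tl => exact ⟨hd, tl, rfl, rfl⟩

theorem mapHead_consHead (f : List Char → List Char) (c : Char) (l : List (List Char))
    (h : l ≠ []) : mapHead f (segs.consHead c l) = mapHead (fun x => f (c :: x)) l := by
  obtain ⟨hd, tl, rfl, heq⟩ := consHead_cases c l h
  simp [heq, mapHead]

theorem mapHead_congr (f g : List Char → List Char) (l : List (List Char))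
    (h : ∀ x, f x = g x) : mapHead f l = mapHead g l := by
  cases l <;> simp [mapHead, h]

theorem mapHead_nil_append (l : List (List Char)) : mapHead (fun x => [] ++ x) l = l := by
  cases l <;> simp [mapHead]

theorem mapHead_cons (f : List Char → List Char) (h : List Char) (t : List (List Char)) :
    mapHead f (h :: t) = f h :: t := rfl

theorem post_cons (x : List Char) (l : List (List Char)) :
    post (x :: l) =
      (if PySem.Chars.strip x ≠ [] then [PySem.Chars.strip x] else []) ++ post l := by
  by_cases h : PySem.Chars.strip x = [] <;> simp [post, h]

theorem splitAGo_eq (cs : List Char) : ∀ (current : List Char) (d : Int)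
    (lits : List (List Char)),
    splitAGo cs current d lits = lits ++ post (mapHead (fun x => current ++ x) (segs cs d)) := by
  induction cs with
  | nil =>
      intro current d lits
      simp only [splitAGo, segs, mapHead, List.append_nil]
      by_cases h : PySem.Chars.strip current = [] <;> simp [post, h]
  | cons c rest ih =>
      intro current d lits
      simp only [splitAGo, segs]
      split_ifs with h1 h2 h3 h4
      · rw [ih, mapHead_consHead _ _ _ (segs_ne_nil rest (d + 1)),
          mapHead_congr _ (fun x => current ++ c :: x) _ (fun x => by simp)]
      · rw [ih, mapHead_consHead _ _ _ (segs_ne_nil rest (d - 1)),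
          mapHead_congr _ (fun x => current ++ c :: x) _ (fun x => by simp)]
      · rw [ih, mapHead_cons, mapHead_nil_append, post_cons]
        simp [h4, List.append_assoc]
      · rw [ih, mapHead_cons, mapHead_nil_append, post_cons]
        simp [h4]
      · rw [ih, mapHead_consHead _ _ _ (segs_ne_nil rest d),
          mapHead_congr _ (fun x => current ++ c :: x) _ (fun x => by simp)]

theorem take_extend (s : List Char) (prev i : Nat) (c : Char) (rest : List Char)
    (hpi : prev ≤ i) (hdrop : s.drop i = c :: rest) :
    (s.drop prev).take (i + 1 - prev) = (s.drop prev).take (i - prev) ++ [c] := by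
  have hlen : i < s.length := by
    by_contra h
    have : s.drop i = [] := List.drop_eq_nil_of_le (by omega)
    simp [this] at hdrop
  have hget : (s.drop prev)[i - prev]? = some c := by
    rw [List.getElem?_drop]
    have : prev + (i - prev) = i := by omega
    rw [this]
    have h0 : (s.drop i)[0]? = some c := by simp [hdrop]
    rwa [List.getElem?_drop, Nat.add_zero] at h0
  have : i + 1 - prev = (i - prev) + 1 := by omega
  rw [this, List.take_add_one, hget]
  rfl

theorem segsGo_eq (cs : List Char) : ∀ (d : Int) (i prev : Nat) (s : List Char),
    s.drop i = cs → prev ≤ i →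
    segsGo s (boundariesGo cs i d ++ [s.length]) prev
      = post (mapHead (fun x => PySem.List.slice s (some (prev : Int)) (some (i : Int)) ++ x)
          (segs cs d)) := by
  induction cs with
  | nil =>
      intro d i prev s hdrop hpi
      have hlen : s.length ≤ i := by
        by_contra h
        have := List.drop_eq_nil_iff.mp hdrop
        omega
      simp only [boundariesGo, List.nil_append, segsGo, segs, mapHead, List.append_nil]
      rw [PySem.List.slice_natCast, PySem.List.slice_natCast]
      have h1 : (s.drop prev).take (s.length - prev) = s.drop prev :=
        List.take_of_length_le (by simp)
      have h2 : (s.drop prev).take (i - prev) = s.drop prev :=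
        List.take_of_length_le (by simp; omega)
      rw [h1, h2]
      by_cases h : PySem.Chars.strip (s.drop prev) = [] <;> simp [post, h]
  | cons c rest ih =>
      intro d i prev s hdrop hpi
      have hdrop' : s.drop (i + 1) = rest := by
        have h := congrArg (List.drop 1) hdrop
        rw [List.drop_drop] at h
        simpa using h
      have hext := take_extend s prev i c rest hpi hdrop
      simp only [boundariesGo, segs]
      split_ifs with h1 h2 h3
      · rw [ih (d + 1) (i + 1) prev s hdrop' (by omega),
          mapHead_consHead _ _ _ (segs_ne_nil rest (d + 1))]
        exact congrArg post (mapHead_congr _ _ _ (fun x => by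
          rw [PySem.List.slice_natCast, PySem.List.slice_natCast, hext]
          simp))
      · rw [ih (d - 1) (i + 1) prev s hdrop' (by omega),
          mapHead_consHead _ _ _ (segs_ne_nil rest (d - 1))]
        exact congrArg post (mapHead_congr _ _ _ (fun x => by
          rw [PySem.List.slice_natCast, PySem.List.slice_natCast, hext]
          simp))
      · simp only [List.cons_append, segsGo]
        rw [ih d (i + 1) (i + 1) s hdrop' (le_refl _)]
        have hslice : PySem.List.slice s (some ((i + 1 : Nat) : Int)) (some ((i + 1 : Nat) : Int))
            = [] := by rw [PySem.List.slice_natCast]; simp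
        rw [hslice, mapHead_nil_append, mapHead_cons, post_cons]
        simp
      · rw [ih d (i + 1) prev s hdrop' (by omega),
          mapHead_consHead _ _ _ (segs_ne_nil rest d)]
        exact congrArg post (mapHead_congr _ _ _ (fun x => by
          rw [PySem.List.slice_natCast, PySem.List.slice_natCast, hext]
          simp))

-- ===== VERDICT (by name: the statement is the Claim_ definition above) =====
theorem split_literals_spec : Claim_equal_split_literals := by
  intro clause_str _
  unfold Spec_split_literals split_literals split_literals_alt
  rw [splitAGo_eq, segsGo_eq clause_str.toList 0 0 0 clause_str.toList rfl (le_refl _)]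
  have h0 : PySem.List.slice clause_str.toList (some ((0 : Nat) : Int)) (some ((0 : Nat) : Int))
      = [] := by rw [PySem.List.slice_natCast]; simp
  rw [h0, mapHead_nil_append]
  rw [List.nil_append]
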